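-- pv_equiv track=rewrite | github.com/open-energy-transition/colombia_substations_workflow | scripts/matching_utils.py | collapse_repeats
-- ===== SOURCE A (Python) =====
-- def collapse_repeats(key: str) -> str:
--     toks = key.split()
--     out = []
--     seen = set()
--     for t in toks:
--         if (t, len(out)) not in seen:
--             out.append(t)
--             seen.add((t, len(out)))
--     return " ".join(out)
-- ===== SOURCE B (Python) =====
-- def collapse_repeats(key: str) -> str:
--     def col(toks):
--         if len(toks) <= 1:
--             return list(toks)
--         mid = len(toks) // 2
--         l = col(toks[:mid])
--         r = col(toks[mid:])
--         if l[-1] == r[0]: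
--             return l + r[1:]
--         return l + r
--     return " ".join(col(key.split()))
-- ===== Notes on version B (the rewrite author's own statement) =====
-- stated objective: alternative
-- what changed: A's per-position seen-set only ever matches the last appended token, i.e. the function collapses consecutive duplicate tokens; B computes the same result by divide and conquer: recursively collapse each half of the token list and merge, dropping the right half's head when it equals the left half's last token.
import Mathlib
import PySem

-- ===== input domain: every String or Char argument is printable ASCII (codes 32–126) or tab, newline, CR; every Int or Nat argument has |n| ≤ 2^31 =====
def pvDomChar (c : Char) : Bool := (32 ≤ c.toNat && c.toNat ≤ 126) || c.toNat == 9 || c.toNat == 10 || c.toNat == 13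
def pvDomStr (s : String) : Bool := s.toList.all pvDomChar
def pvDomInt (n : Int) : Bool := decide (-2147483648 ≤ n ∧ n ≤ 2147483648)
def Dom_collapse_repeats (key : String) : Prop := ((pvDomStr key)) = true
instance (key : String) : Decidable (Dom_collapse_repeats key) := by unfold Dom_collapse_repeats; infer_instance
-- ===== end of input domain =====

-- B replaces A's linear pass with out-list + (token, position) seen-set by a
-- divide-and-conquer collapse of consecutive duplicate tokens; alternative
-- decomposition, no speed claim.

-- ===== PORT A =====
def collapse_repeats (key : String) : String :=
  let toks := PySem.Str.split₀ key
  let st := toks.foldl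
    (fun (st : List String × PySem.Set (String × Int)) t =>
      let out := st.1
      let seen := st.2
      if !(PySem.Set.contains seen (t, (out.length : Int))) then
        let out' := out ++ [t]
        (out', PySem.Set.add seen (t, (out'.length : Int)))
      else st)
    ([], PySem.Set.empty)
  PySem.Str.join " " st.1

-- ===== PORT B =====
-- col: divide and conquer; in the merge, l and r are nonempty (each half has
-- ≥ 1 token), so Python's l[-1] / r[0] are exactly getLast? / head? here.
def pvCol (toks : List String) : List String :=
  match toks with
  | [] => []
  | [t] => [t]
  | a :: b :: rest =>
    let mid := (a :: b :: rest).length / 2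
    let l := pvCol ((a :: b :: rest).take mid)
    let r := pvCol ((a :: b :: rest).drop mid)
    if l.getLast? = r.head? then l ++ r.tail else l ++ r
termination_by toks.length
decreasing_by
  · simp [List.length_take]; omega
  · simp; omega

def collapse_repeats_alt (key : String) : String :=
  PySem.Str.join " " (pvCol (PySem.Str.split₀ key))

-- ===== PRECONDITION & SPEC =====
def Spec_collapse_repeats (key : String) (out : String) : Prop := out = collapse_repeats_alt key
instance (key : String) (out : String) : Decidable (Spec_collapse_repeats key out) := by unfold Spec_collapse_repeats; infer_instance

-- ===== CLAIM (what is proved, stated in full; the proofs are below) =====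
def Claim_equal_collapse_repeats : Prop := ∀ (key : String), Dom_collapse_repeats key → Spec_collapse_repeats key (collapse_repeats key)

-- ===== LEMMAS AND PROOFS =====

-- reference form: collapse consecutive duplicates, given the previously seen token
def pvColFrom (last : Option String) : List String → List String
  | [] => []
  | t :: rest => if last = some t then pvColFrom last rest else t :: pvColFrom (some t) rest

theorem pvColFrom_some (xs : List String) (x : String) :
    pvColFrom (some x) xs =
      if (pvColFrom none xs).head? = some x then (pvColFrom none xs).tail
      else pvColFrom none xs := by
  cases xs with
  | nil => rfl
  | cons y ys =>
    by_cases h : y = x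
    · subst h; simp [pvColFrom]
    · simp [pvColFrom, Ne.symm h, h]

theorem pvColFrom_head (xs : List String) : (pvColFrom none xs).head? = xs.head? := by
  cases xs with
  | nil => rfl
  | cons y ys => simp [pvColFrom]

theorem pvGetLast?_cons_or (t : String) (xs : List String) :
    (t :: xs).getLast? = xs.getLast?.or (some t) := by
  cases xs with
  | nil => rfl
  | cons u us =>
    obtain ⟨v, hv⟩ := Option.isSome_iff_exists.mp
      (List.getLast?_isSome.mpr (by simp : (u :: us : List String) ≠ []))
    rw [List.getLast?_cons_cons, hv, Option.some_or]

theorem pvColFrom_append (xs ys : List String) : ∀ last : Option String,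
    pvColFrom last (xs ++ ys) = pvColFrom last xs ++ pvColFrom (xs.getLast?.or last) ys := by
  induction xs with
  | nil => intro last; simp [pvColFrom]
  | cons t xs ih =>
    intro last
    by_cases h : last = some t
    · subst h
      simp only [List.cons_append, pvColFrom, ih, pvGetLast?_cons_or,
        Option.or_assoc, Option.some_or, if_true]
    · simp only [List.cons_append, pvColFrom, if_neg h, ih, pvGetLast?_cons_or,
        Option.or_assoc, Option.some_or]

theorem pvColFrom_getLast (xs : List String) :
    (pvColFrom none xs).getLast? = xs.getLast? := by
  induction xs with
  | nil => rfl
  | cons t ts ih =>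
    rw [show pvColFrom none (t :: ts) = t :: pvColFrom (some t) ts from by
      rw [pvColFrom]; simp]
    cases ts with
    | nil => simp [pvColFrom]
    | cons u us =>
      rw [pvColFrom_some, pvColFrom_head]
      have hu : pvColFrom none (u :: us) = u :: pvColFrom (some u) us := by
        rw [pvColFrom]; simp
      by_cases h : u = t
      · subst h
        simp only [List.head?_cons, if_true]
        rw [hu, List.tail_cons, ← hu, ih, List.getLast?_cons_cons]
      · simp only [List.head?_cons]
        rw [if_neg (by simpa using h)]
        rw [hu, List.getLast?_cons_cons, ← hu, ih, List.getLast?_cons_cons]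

theorem pvCol_eq_colFrom : ∀ toks : List String, pvCol toks = pvColFrom none toks
  | [] => by rw [pvCol]; rfl
  | [t] => by rw [pvCol]; simp [pvColFrom]
  | a :: b :: rest => by
    have hmidlt : (a :: b :: rest).length / 2 < (a :: b :: rest).length := by simp; omega
    have ihl := pvCol_eq_colFrom ((a :: b :: rest).take ((a :: b :: rest).length / 2))
    have ihr := pvCol_eq_colFrom ((a :: b :: rest).drop ((a :: b :: rest).length / 2))
    rw [pvCol]
    simp only [ihl, ihr]
    have htake : (a :: b :: rest).take ((a :: b :: rest).length / 2) ≠ [] := by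
      simp [List.take_eq_nil_iff]
    obtain ⟨x, hx⟩ := Option.isSome_iff_exists.mp (List.getLast?_isSome.mpr htake)
    conv_rhs => rw [← List.take_append_drop ((a :: b :: rest).length / 2) (a :: b :: rest)]
    rw [pvColFrom_append, Option.or_none, hx, pvColFrom_some]
    rw [pvColFrom_getLast, pvColFrom_head, hx]
    by_cases h : ((a :: b :: rest).drop ((a :: b :: rest).length / 2)).head? = some x
    · rw [if_pos h.symm, if_pos h]
    · rw [if_neg (fun hc => h hc.symm), if_neg h]
termination_by toks => toks.length
decreasing_by
  · simp [List.length_take]; omega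
  · simp; omega

-- loop invariant for A's fold: membership of (t, len(out)) in seen ↔ t is the last token of out,
-- and every pair in seen has second component ≤ len(out)
theorem pvFoldA_eq (toks : List String) : ∀ (out : List String) (seen : PySem.Set (String × Int)),
    (∀ s : String, ((s, (out.length : Int)) ∈ seen ↔ out.getLast? = some s)) →
    (∀ p ∈ seen, p.2 ≤ (out.length : Int)) →
    (toks.foldl
      (fun (st : List String × PySem.Set (String × Int)) t =>
        let out := st.1
        let seen := st.2
        if !(PySem.Set.contains seen (t, (out.length : Int))) then
          let out' := out ++ [t]
          (out', PySem.Set.add seen (t, (out'.length : Int)))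
        else st)
      (out, seen)).1 = out ++ pvColFrom out.getLast? toks := by
  induction toks with
  | nil => intro out seen _ _; simp [pvColFrom]
  | cons t rest ih =>
    intro out seen hmem hle
    simp only [List.foldl_cons]
    by_cases hc : (t, (out.length : Int)) ∈ seen
    · have hlast : out.getLast? = some t := (hmem t).mp hc
      rw [if_neg (by simp [hc])]
      rw [ih out seen hmem hle, pvColFrom, if_pos hlast]
    · have hlast : out.getLast? ≠ some t := fun h => hc ((hmem t).mpr h)
      rw [if_pos (by simp [hc])]
      have hmem' : ∀ s : String,
          ((s, ((out ++ [t]).length : Int)) ∈ PySem.Set.add seen (t, ((out ++ [t]).length : Int))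
            ↔ (out ++ [t]).getLast? = some s) := by
        intro s
        rw [PySem.Set.mem_add]
        constructor
        · rintro (h | h)
          · exact absurd (hle _ h) (by simp)
          · simp only [Prod.mk.injEq] at h
            simp [h.1]
        · intro h
          right
          simp [List.getLast?_append] at h
          simp [h]
      have hle' : ∀ p ∈ PySem.Set.add seen (t, ((out ++ [t]).length : Int)),
          p.2 ≤ ((out ++ [t]).length : Int) := by
        intro p hp
        rw [PySem.Set.mem_add] at hp
        rcases hp with h | h
        · have := hle _ h; simp; omega
        · simp [h]
      rw [ih (out ++ [t]) _ hmem' hle']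
      rw [pvColFrom, if_neg hlast]
      simp [List.getLast?_append]

-- ===== VERDICT (by name: the statement is the Claim_ definition above) =====
theorem collapse_repeats_spec : Claim_equal_collapse_repeats := by
  intro key _
  unfold Spec_collapse_repeats collapse_repeats collapse_repeats_alt
  rw [pvCol_eq_colFrom]
  have h := pvFoldA_eq (PySem.Str.split₀ key) [] PySem.Set.empty
    (by intro s; simp [PySem.Set.empty]) (by intro p hp; simp [PySem.Set.empty] at hp)
  simp only [h, List.nil_append, List.getLast?_nil]
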